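-- pv_equiv track=rewrite | github.com/SchBenedikt/mynd | backend/features/tasks/simple.py | _extract_ics_property
-- ===== SOURCE A (Python) =====
-- from typing import List, Dict, Optional, Union
--
-- def _unfold_ics_lines(ics_content: str) -> List[str]:
--     """Unfold folded iCalendar lines according to RFC 5545."""
--     lines = ics_content.replace('\r\n', '\n').replace('\r', '\n').split('\n')
--     unfolded: List[str] = []
--     for line in lines:
--         if not line:
--             continue
--         if line.startswith((' ', '\t')) and unfolded:
--             unfolded[-1] += line[1:]
--         else:
--             unfolded.append(line)
--     return unfolded
--
-- def _extract_ics_property(ics_content: str, property_name: str) -> Optional[str]: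
--     """Return first iCalendar property value and support optional parameters."""
--     prefix = property_name.upper()
--     for line in _unfold_ics_lines(ics_content):
--         upper = line.upper()
--         if upper.startswith(prefix + ':') or upper.startswith(prefix + ';'):
--             _, _, value = line.partition(':')
--             return value.strip() if value is not None else None
--     return None
-- ===== SOURCE B (Python) =====
-- from typing import Optional
--
-- def _extract_ics_property(ics_content: str, property_name: str) -> Optional[str]:
--     """Single streaming pass: unfold and match in one loop, no intermediate list."""
--     prefix = property_name.upper()
--
--     def finalize(buf: str) -> Optional[str]:
--         upper = buf.upper()
--         if upper.startswith(prefix + ':') or upper.startswith(prefix + ';'):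
--             _, _, value = buf.partition(':')
--             return value.strip()
--         return None
--
--     result: Optional[str] = None
--     buf: Optional[str] = None
--     for line in ics_content.replace('\r\n', '\n').replace('\r', '\n').split('\n'):
--         if not line:
--             continue
--         if line.startswith((' ', '\t')) and buf is not None:
--             buf += line[1:]
--         else:
--             if result is None and buf is not None:
--                 result = finalize(buf)
--             buf = line
--     if result is None and buf is not None:
--         result = finalize(buf)
--     return result
-- ===== Notes on version B (the rewrite author's own statement) =====
-- stated objective: alternative
-- what changed: B replaces A's two-phase design (build the complete unfolded-lines list, then scan it for the first match) by a single streaming pass that keeps only the current logical-line buffer and the first match found, flushing the trailing buffer at the end.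
import Mathlib
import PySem

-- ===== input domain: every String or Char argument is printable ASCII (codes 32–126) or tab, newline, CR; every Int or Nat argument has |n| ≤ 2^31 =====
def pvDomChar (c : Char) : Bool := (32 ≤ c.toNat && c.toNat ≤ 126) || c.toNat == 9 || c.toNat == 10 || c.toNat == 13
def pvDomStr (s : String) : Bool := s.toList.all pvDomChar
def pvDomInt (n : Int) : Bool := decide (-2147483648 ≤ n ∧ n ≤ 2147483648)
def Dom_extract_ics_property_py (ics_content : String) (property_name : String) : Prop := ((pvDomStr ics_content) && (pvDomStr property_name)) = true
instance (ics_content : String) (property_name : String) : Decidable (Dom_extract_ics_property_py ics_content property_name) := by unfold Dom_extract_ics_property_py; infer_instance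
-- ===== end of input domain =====

-- B is a single streaming pass (buffer + first match) instead of A's build-full-list-then-scan; same result, an alternative decomposition.

-- ===== PORT A =====
-- shared by both ports: both Pythons contain this identical normalization/split expression
def pvSplitLines (ics_content : String) : List (List Char) :=
  PySem.Chars.splitOn
    (PySem.Chars.replace (PySem.Chars.replace ics_content.toList ['\r', '\n'] ['\n']) ['\r'] ['\n'])
    ['\n']

-- both Pythons contain this identical match test: line.upper().startswith(prefix+':') or …(prefix+';')
def pvMatch (pfx line : List Char) : Bool :=
  PySem.Chars.startswith (PySem.Chars.upper line) (pfx ++ [':']) ||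
  PySem.Chars.startswith (PySem.Chars.upper line) (pfx ++ [';'])

-- hand port of the value part of str.partition(':'): text after the FIRST ':' , '' if absent (exact)
def pvPartitionVal (line : List Char) : List Char :=
  let i := PySem.Chars.find line [':']
  if i = -1 then [] else line.drop (i.toNat + 1)

-- one iteration of A's _unfold_ics_lines loop
def pvUnfoldStep (acc : List (List Char)) (line : List Char) : List (List Char) :=
  if line = [] then acc
  else if (PySem.Chars.startswith line [' '] || PySem.Chars.startswith line ['\t']) && !acc.isEmpty then
    acc.dropLast ++ [acc.getLastD [] ++ PySem.List.slice line (some 1) none]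
  else
    acc ++ [line]

-- A's second loop: first matching unfolded line, then value.partition/strip
def pvScan (pfx : List Char) (ls : List (List Char)) : Option (List Char) :=
  (ls.find? (fun l => pvMatch pfx l)).map (fun l => PySem.Chars.strip (pvPartitionVal l))

def extract_ics_property_py (ics_content : String) (property_name : String) : Option String :=
  let pfx := PySem.Chars.upper property_name.toList
  let unfolded := (pvSplitLines ics_content).foldl pvUnfoldStep []
  (pvScan pfx unfolded).map String.ofList

-- ===== PORT B =====
-- B's finalize(buf): test the completed logical line, return its stripped value if it matches
def pvFinalize (pfx buf : List Char) : Option (List Char) :=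
  if pvMatch pfx buf then some (PySem.Chars.strip (pvPartitionVal buf)) else none

-- one iteration of B's single streaming loop; state = (first result so far, current logical-line buffer)
def pvStepB (pfx : List Char) (st : Option (List Char) × Option (List Char)) (line : List Char) :
    Option (List Char) × Option (List Char) :=
  if line = [] then st
  else if (PySem.Chars.startswith line [' '] || PySem.Chars.startswith line ['\t']) && st.2.isSome then
    (st.1, st.2.map (fun b => b ++ PySem.List.slice line (some 1) none))
  else
    (st.1.orElse (fun _ => st.2.bind (pvFinalize pfx)), some line)

def extract_ics_property_py_alt (ics_content : String) (property_name : String) : Option String :=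
  let pfx := PySem.Chars.upper property_name.toList
  let st := (pvSplitLines ics_content).foldl (pvStepB pfx) (none, none)
  ((st.1.orElse (fun _ => st.2.bind (pvFinalize pfx)))).map String.ofList

-- ===== PRECONDITION & SPEC =====
def Spec_extract_ics_property_py (ics_content : String) (property_name : String) (out : Option String) : Prop := out = extract_ics_property_py_alt ics_content property_name
instance (ics_content : String) (property_name : String) (out : Option String) : Decidable (Spec_extract_ics_property_py ics_content property_name out) := by unfold Spec_extract_ics_property_py; infer_instance

-- ===== CLAIM (what is proved, stated in full; the proofs are below) =====
def Claim_equal_extract_ics_property_py : Prop := ∀ (ics_content : String) (property_name : String), Dom_extract_ics_property_py ics_content property_name → Spec_extract_ics_property_py ics_content property_name (extract_ics_property_py ics_content property_name)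

-- ===== LEMMAS AND PROOFS =====

lemma pvFinalize_eq_scan_singleton (pfx b : List Char) :
    pvScan pfx [b] = pvFinalize pfx b := by
  simp only [pvScan, pvFinalize, List.find?]
  by_cases h : pvMatch pfx b <;> simp [h]

lemma pvScan_append (pfx : List Char) (xs ys : List (List Char)) :
    pvScan pfx (xs ++ ys) = (pvScan pfx xs).orElse (fun _ => pvScan pfx ys) := by
  simp only [pvScan, List.find?_append]
  cases xs.find? (fun l => pvMatch pfx l) <;> simp

-- flushing the last pending logical line equals scanning the whole list
lemma pvScan_flush (pfx : List Char) (acc : List (List Char)) :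
    pvScan pfx acc =
      (pvScan pfx acc.dropLast).orElse (fun _ => acc.getLast?.bind (pvFinalize pfx)) := by
  rcases List.eq_nil_or_concat' acc with rfl | ⟨pre, b, rfl⟩
  · simp [pvScan]
  · rw [List.dropLast_concat, List.getLast?_concat, pvScan_append]
    simp [pvFinalize_eq_scan_singleton]

-- the loop invariant: B's buffer is the last unfolded line, B's result the scan of the finalized ones
lemma pvLoop (pfx : List Char) (lines : List (List Char)) :
    ∀ (acc : List (List Char)) (res buf : Option (List Char)),
      buf = acc.getLast? → res = pvScan pfx acc.dropLast →
      pvScan pfx (lines.foldl pvUnfoldStep acc) =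
        ((lines.foldl (pvStepB pfx) (res, buf)).1).orElse
          (fun _ => ((lines.foldl (pvStepB pfx) (res, buf)).2).bind (pvFinalize pfx)) := by
  induction lines with
  | nil =>
      intro acc res buf hb hr
      simpa [hb, hr] using pvScan_flush pfx acc
  | cons line rest ih =>
      intro acc res buf hb hr
      simp only [List.foldl_cons]
      by_cases hnil : line = []
      · rw [show pvUnfoldStep acc line = acc by simp [pvUnfoldStep, hnil],
            show pvStepB pfx (res, buf) line = (res, buf) by simp [pvStepB, hnil]]
        exact ih acc res buf hb hr
      · have hsome : buf.isSome = !acc.isEmpty := by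
          rcases List.eq_nil_or_concat' acc with rfl | ⟨pre, b, rfl⟩ <;>
            simp [hb]
        by_cases hcont :
            (PySem.Chars.startswith line [' '] || PySem.Chars.startswith line ['\t']) = true
        · by_cases hne : acc.isEmpty
          · -- continuation char but no buffer yet: both start a fresh line
            rcases List.isEmpty_iff.mp hne with rfl
            have hbuf : buf = none := by simpa using hb
            rw [show pvUnfoldStep [] line = [] ++ [line] by simp [pvUnfoldStep, hnil, hcont],
                show pvStepB pfx (res, buf) line =
                  (res.orElse (fun _ => buf.bind (pvFinalize pfx)), some line) by
                  simp [pvStepB, hnil, hcont, hbuf]]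
            exact ih _ _ _ (by simp) (by simp [hbuf, hr])
          · -- append to the pending buffer
            rcases List.eq_nil_or_concat' acc with rfl | ⟨pre, b, rfl⟩
            · simp at hne
            · have hbuf : buf = some b := by simp [hb]
              rw [show pvUnfoldStep (pre ++ [b]) line =
                    pre ++ [b ++ PySem.List.slice line (some 1) none] by
                    simp [pvUnfoldStep, hnil, hcont],
                  show pvStepB pfx (res, buf) line =
                    (res, some (b ++ PySem.List.slice line (some 1) none)) by
                    simp [pvStepB, hnil, hcont, hbuf]]
              exact ih _ _ _ (by simp [])
                (by simpa [List.dropLast_concat] using hr)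
        · -- ordinary new line: A appends; B finalizes the buffer and restarts it
          rw [show pvUnfoldStep acc line = acc ++ [line] by
                simp [pvUnfoldStep, hnil, hcont],
              show pvStepB pfx (res, buf) line =
                (res.orElse (fun _ => buf.bind (pvFinalize pfx)), some line) by
                simp [pvStepB, hnil, hcont],
              ]
          exact ih _ _ _ (by simp [])
            (by rw [List.dropLast_concat, pvScan_flush pfx acc, hr, hb])

-- ===== VERDICT (by name: the statement is the Claim_ definition above) =====
theorem extract_ics_property_py_spec : Claim_equal_extract_ics_property_py := by
  intro ics_content property_name _
  unfold Spec_extract_ics_property_py extract_ics_property_py extract_ics_property_py_alt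
  exact congrArg (Option.map String.ofList)
    (pvLoop (PySem.Chars.upper property_name.toList) (pvSplitLines ics_content) [] none none rfl rfl)
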